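-- pv_equiv track=rewrite | github.com/chifeng111/python_demo | src/day09-牛客网做题/11-庆祝61.py | f
-- ===== SOURCE A (Python) =====
-- def f(l):
--     s = sorted(l)
--     new_l = []
--     for inx, val in enumerate(s):
--         if inx%2:
--             new_l.append(val)
--         else:
--             new_l.insert(0, val)
--     return new_l
-- ===== SOURCE B (Python) =====
-- def f(l):
--     s = sorted(l)
--     n = len(s)
--     m = (n + 1) // 2
--     res = [0] * n
--     left, right = m - 1, m
--     for i, v in enumerate(s):
--         if i % 2:
--             res[right] = v
--             right += 1
--         else:
--             res[left] = v
--             left -= 1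
--     return res
-- ===== Notes on version B (the rewrite author's own statement) =====
-- stated objective: faster
-- what changed: B replaces A's alternating insert-at-front/append into a growing list (each insert(0,·) shifts the whole list) with a preallocated result array filled center-out by two cursors: even-ranked sorted elements leftward from the middle, odd-ranked rightward.
import Mathlib
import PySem

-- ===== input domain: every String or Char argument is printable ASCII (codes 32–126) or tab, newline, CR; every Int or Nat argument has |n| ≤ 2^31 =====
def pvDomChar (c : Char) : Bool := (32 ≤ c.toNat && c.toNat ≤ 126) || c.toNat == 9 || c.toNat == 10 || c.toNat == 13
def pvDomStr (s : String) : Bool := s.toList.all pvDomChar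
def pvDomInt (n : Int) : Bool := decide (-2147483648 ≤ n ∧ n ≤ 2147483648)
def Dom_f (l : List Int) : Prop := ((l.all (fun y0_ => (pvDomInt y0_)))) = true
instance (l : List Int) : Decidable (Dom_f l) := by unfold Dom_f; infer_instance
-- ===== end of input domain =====

-- B builds the valley shape by center-out placement into a preallocated array instead of
-- A's alternating insert-at-front/append into a growing list (objective: alternative).

-- ===== PORT A =====
-- the for-loop over enumerate(s) with accumulator new_l: even index → insert(0, val), odd → append
def fLoopA : List (Int × Int) → List Int → List Int
  | [], acc => acc
  | (i, v) :: rest, acc =>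
    if PySem.Int.mod i 2 ≠ 0 then fLoopA rest (acc ++ [v])
    else fLoopA rest (v :: acc)

def f (l : List Int) : List Int :=
  fLoopA (PySem.List.enumerate (PySem.List.sorted l (fun x => x) false) 0) []

-- ===== PORT B =====
-- the for-loop over enumerate(s): res[right] = v / res[left] = v, cursors moving outward
def fLoopB : List (Int × Int) → List Int → Int → Int → List Int
  | [], res, _, _ => res
  | (i, v) :: rest, res, left, right =>
    if PySem.Int.mod i 2 ≠ 0 then fLoopB rest (PySem.List.pySetD res right v) left (right + 1)
    else fLoopB rest (PySem.List.pySetD res left v) (left - 1) right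

def f_alt (l : List Int) : List Int :=
  let s := PySem.List.sorted l (fun x => x) false
  let n := PySem.List.len s
  let m := PySem.Int.floordiv (n + 1) 2
  fLoopB (PySem.List.enumerate s 0) (List.replicate n.toNat 0) (m - 1) m

-- ===== PRECONDITION & SPEC =====
def Spec_f (l : List Int) (out : List Int) : Prop := out = f_alt l
instance (l : List Int) (out : List Int) : Decidable (Spec_f l out) := by unfold Spec_f; infer_instance

-- ===== CLAIM (what is proved, stated in full; the proofs are below) =====
def Claim_equal_f : Prop := ∀ (l : List Int), Dom_f l → Spec_f l (f l)

-- ===== LEMMAS AND PROOFS =====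

-- the even- and odd-indexed elements of a list
def evens : List Int → List Int
  | [] => []
  | [a] => [a]
  | a :: _ :: t => a :: evens t

def odds : List Int → List Int
  | [] => []
  | [_] => []
  | _ :: b :: t => b :: odds t

theorem length_evens (t : List Int) : (evens t).length = (t.length + 1) / 2 := by
  induction t using evens.induct with
  | case1 => simp [evens]
  | case2 a => simp [evens]
  | case3 a b t ih => simp [evens, ih]; omega

theorem length_odds (t : List Int) : (odds t).length = t.length / 2 := by
  induction t using odds.induct with
  | case1 => simp [odds]
  | case2 a => simp [odds]
  | case3 a b t ih => simp [odds, ih]; omega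

theorem mod_two_succ (i : Int) (h : PySem.Int.mod i 2 = 0) : PySem.Int.mod (i + 1) 2 ≠ 0 := by
  rw [PySem.Int.mod_eq_emod_of_pos] at h ⊢ <;> omega

theorem mod_two_succ_succ (i : Int) (h : PySem.Int.mod i 2 = 0) :
    PySem.Int.mod (i + 1 + 1) 2 = 0 := by
  rw [PySem.Int.mod_eq_emod_of_pos] at h ⊢ <;> omega

theorem fLoopA_spec (t : List Int) :
    ∀ (acc : List Int) (i : Int), PySem.Int.mod i 2 = 0 →
      fLoopA (PySem.List.enumerate t i) acc = (evens t).reverse ++ acc ++ odds t := by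
  induction t using evens.induct with
  | case1 =>
    intro acc i _; simp [PySem.List.enumerate_nil, fLoopA, evens, odds]
  | case2 a =>
    intro acc i h
    rw [PySem.List.enumerate_cons]
    simp only [fLoopA]
    rw [if_neg (not_not_intro h)]
    simp [PySem.List.enumerate_nil, fLoopA, evens, odds]
  | case3 a b t ih =>
    intro acc i h
    rw [PySem.List.enumerate_cons, PySem.List.enumerate_cons]
    simp only [fLoopA]
    rw [if_neg (not_not_intro h), if_pos (mod_two_succ i h),
      ih ((a :: acc) ++ [b]) (i + 1 + 1) (mod_two_succ_succ i h)]
    simp [evens, odds]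

-- setting the element just after prefix w
theorem set_at_append (w : List Int) (x : Int) (rest : List Int) (v : Int) :
    (w ++ x :: rest).set w.length v = w ++ v :: rest := by
  induction w with
  | nil => simp
  | cons y w ih => simp [ih]

theorem fLoopB_spec (t : List Int) :
    ∀ (z1 c z2 : List Int) (i : Int), PySem.Int.mod i 2 = 0 →
      z1.length = (evens t).length → z2.length = (odds t).length →
      fLoopB (PySem.List.enumerate t i) (z1 ++ c ++ z2)
        ((z1.length : Int) - 1) ((z1.length : Int) + (c.length : Int)) =
      (evens t).reverse ++ c ++ odds t := by
  induction t using evens.induct with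
  | case1 =>
    intro z1 c z2 i _ h1 h2
    rw [List.length_eq_zero_iff.mp (h1.trans (by simp [evens])),
        List.length_eq_zero_iff.mp (h2.trans (by simp [odds]))]
    simp [PySem.List.enumerate_nil, fLoopB, evens, odds]
  | case2 a =>
    intro z1 c z2 i h h1 h2
    obtain ⟨x, hx⟩ := List.length_eq_one_iff.mp (h1.trans (by simp [evens]))
    rw [List.length_eq_zero_iff.mp (h2.trans (by simp [odds])), hx]
    rw [PySem.List.enumerate_cons, PySem.List.enumerate_nil]
    simp only [fLoopB]
    rw [if_neg (not_not_intro h)]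
    have e0 : (([x] : List Int).length : Int) - 1 = ((0 : Nat) : Int) := by simp
    rw [e0, PySem.List.pySetD_natCast]
    simp [evens, odds]
  | case3 a b t ih =>
    intro z1 c z2 i h h1 h2
    have hz1 : z1 ≠ [] := by
      intro hn; rw [hn] at h1; simp [evens] at h1
    obtain ⟨w, x, hwx⟩ := (List.eq_nil_or_concat z1).resolve_left hz1
    rw [List.concat_eq_append] at hwx
    obtain ⟨y, z2', hy⟩ : ∃ y z2', z2 = y :: z2' := by
      cases z2 with
      | nil => simp [odds] at h2
      | cons y z2' => exact ⟨y, z2', rfl⟩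
    subst hwx hy
    rw [PySem.List.enumerate_cons, PySem.List.enumerate_cons]
    simp only [fLoopB]
    rw [if_neg (not_not_intro h), if_pos (mod_two_succ i h)]
    -- first set: position |z1| - 1 = |w|
    have e1 : ((w ++ [x]).length : Int) - 1 = ((w.length : Nat) : Int) := by simp
    rw [e1, PySem.List.pySetD_natCast]
    have e2 : (w ++ [x]) ++ c ++ (y :: z2') = w ++ x :: (c ++ y :: z2') := by simp
    rw [e2, set_at_append w x (c ++ y :: z2') a]
    -- second set: position |z1| + |c| = |w ++ a :: c|
    have e3 : ((w ++ [x]).length : Int) + (c.length : Int) = (((w ++ a :: c).length : Nat) : Int) := by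
      simp; omega
    rw [e3, PySem.List.pySetD_natCast]
    have e4 : w ++ a :: (c ++ y :: z2') = (w ++ a :: c) ++ y :: z2' := by simp
    rw [e4, set_at_append (w ++ a :: c) y z2' b]
    have e5 : (w ++ a :: c) ++ b :: z2' = w ++ (a :: (c ++ [b])) ++ z2' := by simp
    rw [e5]
    have h1' : w.length = (evens t).length := by
      simp [evens] at h1; omega
    have h2' : z2'.length = (odds t).length := by
      simp [odds] at h2; omega
    have hIH := ih w (a :: (c ++ [b])) z2' (i + 1 + 1) (mod_two_succ_succ i h) h1' h2'
    have e6 : ((w.length : Int)) + (((a :: (c ++ [b])).length : Nat) : Int) =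
        ((w ++ [x]).length : Int) + (c.length : Int) + 1 := by simp; omega
    rw [e6] at hIH
    rw [e3] at hIH
    rw [hIH]
    simp [evens, odds]

theorem replicate_split (t : List Int) :
    List.replicate t.length (0 : Int) =
      List.replicate (evens t).length (0 : Int) ++ [] ++ List.replicate (odds t).length (0 : Int) := by
  rw [length_evens, length_odds]
  simp only [List.append_nil]
  rw [← List.replicate_add]
  congr 1
  omega

-- ===== VERDICT (by name: the statement is the Claim_ definition above) =====
theorem f_spec : Claim_equal_f := by
  intro l _
  unfold Spec_f f f_alt
  set s := PySem.List.sorted l (fun x => x) false with hs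
  simp only [PySem.List.len_eq, Int.toNat_natCast]
  have hm : PySem.Int.floordiv ((s.length : Int) + 1) 2 = (((s.length + 1) / 2 : Nat) : Int) := by
    have e : ((s.length : Int) + 1) = ((s.length + 1 : Nat) : Int) := by push_cast; ring
    rw [e]
    exact_mod_cast PySem.Int.floordiv_natCast (s.length + 1) 2
  rw [hm, replicate_split s, fLoopA_spec s [] 0 (by decide)]
  have hB := fLoopB_spec s (List.replicate (evens s).length 0) []
      (List.replicate (odds s).length 0) 0 (by decide) (by simp) (by simp)
  rw [List.length_replicate] at hB
  have e1 : (((s.length + 1) / 2 : Nat) : Int) - 1 = ((evens s).length : Int) - 1 := by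
    rw [length_evens]
  have e2 : (((s.length + 1) / 2 : Nat) : Int) = ((evens s).length : Int) + (([] : List Int).length : Int) := by
    rw [length_evens]; simp
  rw [e1]
  conv_rhs => rw [e2]
  rw [hB]
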